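-- pv_equiv track=rewrite | github.com/juhyun-99/Baekjoon_algorithm | 백준/Gold/1407. 2로 몇 번 나누어질까/2로 몇 번 나누어질까.py | cnt
-- ===== SOURCE A (Python) =====
-- def cnt(num):
--     if num == 0:
--         return 0
--
--     elif num == 1:
--         return 1
--
--     elif num % 2 == 0: # 짝수일때 1의 개수는 num//2개 + f(num // 2) * 2
--         return cnt(num//2) * 2 + num // 2
--
--     elif num % 2 == 1: #홀수 일 때 f(num - 1) + 1개
--         return cnt(num - 1) + 1
-- ===== SOURCE B (Python) =====
-- def cnt(num):
--     # Sum over bit positions: among the first num positive integers there are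
--     # num//p - num//(2*p) whose largest power-of-two divisor is exactly p;
--     # each contributes p to the total (successive differences of cnt are the
--     # largest power of two dividing the new index).
--     total = 0
--     p = 1
--     while p <= num:
--         total += (num // p - num // (2 * p)) * p
--         p *= 2
--     return total
-- ===== Notes on version B (the rewrite author's own statement) =====
-- stated objective: alternative
-- what changed: Replaces the halving/decrementing recursion by a non-recursive loop over bit positions with a doubling power p, adding (num//p - num//(2p))*p, i.e. counting integers in [1,num] by their largest power-of-two divisor.
import Mathlib
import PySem

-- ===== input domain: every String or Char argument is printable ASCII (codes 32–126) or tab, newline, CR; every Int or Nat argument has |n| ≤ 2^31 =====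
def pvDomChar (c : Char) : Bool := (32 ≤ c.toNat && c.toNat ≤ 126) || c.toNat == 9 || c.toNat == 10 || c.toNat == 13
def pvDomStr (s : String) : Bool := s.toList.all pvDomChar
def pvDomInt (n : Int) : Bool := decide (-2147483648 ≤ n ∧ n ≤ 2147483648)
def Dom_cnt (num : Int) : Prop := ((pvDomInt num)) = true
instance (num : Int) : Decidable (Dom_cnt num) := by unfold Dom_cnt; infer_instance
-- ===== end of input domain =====

-- B replaces A's halving/decrementing recursion by a loop over bit positions with a doubling
-- power p, adding (num//p − num//(2p))·p; Pre_ restricts to 0 ≤ num (A infinitely recurses on negatives).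


-- ===== PORT A =====
-- A's recursion (fuel = num.toNat + 1 suffices since the argument drops by ≥ 1 each call;
-- fuel only makes the recursion total, it is exhausted only outside Pre_cnt)
def cntAux : Nat → Int → Int
  | 0, _ => 0
  | f + 1, num =>
    if num = 0 then 0
    else if num = 1 then 1
    else if PySem.Int.mod num 2 = 0 then
      cntAux f (PySem.Int.floordiv num 2) * 2 + PySem.Int.floordiv num 2
    else cntAux f (num - 1) + 1

def cnt (num : Int) : Int := cntAux (num.toNat + 1) num

-- ===== PORT B =====
-- Source B's while loop (fuel = num.toNat + 1 suffices since p doubles from 1 while p ≤ num)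
def cntAltLoop : Nat → Int → Int → Int → Int
  | 0, _, _, total => total
  | f + 1, num, p, total =>
    if p ≤ num then
      cntAltLoop f num (2 * p)
        (total + (PySem.Int.floordiv num p - PySem.Int.floordiv num (2 * p)) * p)
    else total

def cnt_alt (num : Int) : Int := cntAltLoop (num.toNat + 1) num 1 0

-- ===== PRECONDITION & SPEC =====
-- Pre_ excludes negative num, on which A recurses forever (Python RecursionError)
def Pre_cnt (num : Int) : Prop := 0 ≤ num
instance (num : Int) : Decidable (Pre_cnt num) := by unfold Pre_cnt; infer_instance
def pvWitness_cnt : Int := (6)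
def Spec_cnt (num : Int) (out : Int) : Prop := out = cnt_alt num
instance (num : Int) (out : Int) : Decidable (Spec_cnt num out) := by unfold Spec_cnt; infer_instance

-- ===== CLAIM (what is proved, stated in full; the proofs are below) =====
def Claim_equal_cnt : Prop := ∀ (num : Int), Dom_cnt num → Pre_cnt num → Spec_cnt num (cnt num)

-- ===== LEMMAS AND PROOFS =====

theorem L_stop (f : Nat) (n p t : Int) (h : ¬ p ≤ n) : cntAltLoop f n p t = t := by
  cases f <;> simp [cntAltLoop, h]

theorem L_acc (f : Nat) : ∀ (n p t : Int), cntAltLoop f n p t = t + cntAltLoop f n p 0 := by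
  induction f with
  | zero => intro n p t; simp [cntAltLoop]
  | succ f ih =>
    intro n p t
    by_cases h : p ≤ n
    · simp only [cntAltLoop, if_pos h]
      rw [ih n (2*p), ih n (2*p) (0 + _)]
      ring
    · simp [cntAltLoop, h]

theorem L_fuel (f : Nat) : ∀ (f' : Nat) (n p t : Int), 0 < p → n < p * 2 ^ f → f ≤ f' →
    cntAltLoop f' n p t = cntAltLoop f n p t := by
  induction f with
  | zero =>
    intro f' n p t hp hb _
    have h : ¬ p ≤ n := by simp at hb; omega
    rw [L_stop _ _ _ _ h, L_stop _ _ _ _ h]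
  | succ f ih =>
    intro f' n p t hp hb hf
    obtain ⟨f'', rfl⟩ : ∃ k, f' = k + 1 := ⟨f' - 1, by omega⟩
    by_cases h : p ≤ n
    · simp only [cntAltLoop, if_pos h]
      apply ih _ _ _ _ (by omega)
      · have : p * 2 ^ (f + 1) = 2 * p * 2 ^ f := by ring
        omega
      · omega
    · simp [cntAltLoop, h]

theorem L_ext (f f' : Nat) (n p t : Int) (hp : 0 < p)
    (hb : n < p * 2 ^ f) (hb' : n < p * 2 ^ f') :
    cntAltLoop f n p t = cntAltLoop f' n p t := by
  rcases le_total f f' with h | h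
  · rw [L_fuel f f' n p t hp hb h]
  · rw [L_fuel f' f n p t hp hb' h]

theorem L_double (f : Nat) : ∀ (n p t : Int), 0 < p →
    cntAltLoop f (2 * n) (2 * p) t = t + 2 * cntAltLoop f n p 0 := by
  induction f with
  | zero => intro n p t hp; simp [cntAltLoop]
  | succ f ih =>
    intro n p t hp
    by_cases h : p ≤ n
    · have h2 : (2 : Int) * p ≤ 2 * n := by omega
      simp only [cntAltLoop, if_pos h, if_pos h2]
      rw [PySem.Int.floordiv_eq_ediv_of_pos (by omega), PySem.Int.floordiv_eq_ediv_of_pos (by omega),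
          PySem.Int.floordiv_eq_ediv_of_pos (by omega), PySem.Int.floordiv_eq_ediv_of_pos (by omega)]
      have e1 : 2 * n / (2 * p) = n / p := Int.mul_ediv_mul_of_pos _ _ (by omega)
      have e2 : 2 * n / (2 * (2 * p)) = n / (2 * p) := Int.mul_ediv_mul_of_pos _ _ (by omega)
      have e3 : (2 : Int) * (2 * p) = 2 * (2 * p) := rfl
      rw [e1, e2]
      rw [show (2 : Int) * (2 * p) = 2 * (2 * p) from rfl]
      rw [ih n (2 * p) _ (by omega)]
      rw [L_acc f n (2 * p) (0 + (n / p - n / (2 * p)) * p)]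
      ring
    · have h2 : ¬ (2 : Int) * p ≤ 2 * n := by omega
      simp [cntAltLoop, h]

-- for odd a and positive even divisor, the floor quotient ignores the trailing 1
theorem odd_ediv (m c : Int) (hc : 0 < c) : (2 * m + 1) / (2 * c) = 2 * m / (2 * c) := by
  have hlt := Int.emod_lt_of_pos m hc
  have hge := Int.emod_nonneg m (by omega : c ≠ 0)
  have k1 : 2 * m + 1 = (2 * (m % c) + 1) + (m / c) * (2 * c) := by
    nlinarith [Int.emod_add_ediv m c]
  have k2 : 2 * m = (2 * (m % c)) + (m / c) * (2 * c) := by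
    nlinarith [Int.emod_add_ediv m c]
  have z1 : (2 * (m % c) + 1) / (2 * c) = 0 := Int.ediv_eq_zero_of_lt (by omega) (by omega)
  have z2 : (2 * (m % c)) / (2 * c) = 0 := Int.ediv_eq_zero_of_lt (by omega) (by omega)
  rw [k1, k2, Int.add_mul_ediv_right _ _ (by omega : (2 : Int) * c ≠ 0),
      Int.add_mul_ediv_right _ _ (by omega : (2 : Int) * c ≠ 0), z1, z2]

theorem L_oddstep (f : Nat) : ∀ (n p t : Int), n % 2 = 1 → 0 ≤ n → 0 < p →
    cntAltLoop f n (2 * p) t = cntAltLoop f (n - 1) (2 * p) t := by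
  induction f with
  | zero => intro n p t _ _ _; rfl
  | succ f ih =>
    intro n p t hodd hn hp
    obtain ⟨m, hm⟩ : ∃ m, n = 2 * m + 1 := ⟨n / 2, by omega⟩
    by_cases h : 2 * p ≤ n
    · have h2 : 2 * p ≤ n - 1 := by omega
      simp only [cntAltLoop, if_pos h, if_pos h2]
      rw [PySem.Int.floordiv_eq_ediv_of_pos (by omega), PySem.Int.floordiv_eq_ediv_of_pos (by omega),
          PySem.Int.floordiv_eq_ediv_of_pos (by omega), PySem.Int.floordiv_eq_ediv_of_pos (by omega)]
      have e1 : n / (2 * p) = (n - 1) / (2 * p) := by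
        rw [hm, show 2 * m + 1 - 1 = 2 * m by ring]; exact odd_ediv m p hp
      have e2 : n / (2 * (2 * p)) = (n - 1) / (2 * (2 * p)) := by
        rw [hm, show 2 * m + 1 - 1 = 2 * m by ring]; exact odd_ediv m (2 * p) (by omega)
      rw [e1, e2, show (2 : Int) * (2 * p) = 2 * (2 * p) from rfl]
      exact ih n (2 * p) _ hodd hn (by omega)
    · have h2 : ¬ 2 * p ≤ n - 1 := by omega
      rw [L_stop _ _ _ _ h, L_stop _ _ _ _ h2]

theorem int_lt_two_pow (n : Int) (hn : 0 ≤ n) : n < 2 ^ (n.toNat + 1) := by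
  have h := Nat.lt_two_pow_self (n := n.toNat)
  have : (n.toNat : Int) < ((2 ^ n.toNat : Nat) : Int) := by exact_mod_cast h
  push_cast at this
  have hpow : (2 : Int) ^ n.toNat ≤ 2 ^ (n.toNat + 1) := by
    rw [pow_succ]
    nlinarith [pow_pos (by norm_num : (0:Int) < 2) n.toNat]
  omega

theorem alt_canon (f : Nat) (n : Int) (hn : 0 ≤ n) (hb : n < 2 ^ f) :
    cntAltLoop f n 1 0 = cnt_alt n := by
  unfold cnt_alt
  exact L_ext f (n.toNat + 1) n 1 0 (by omega) (by simpa using hb)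
    (by simpa using int_lt_two_pow n hn)

theorem L_double2 (f : Nat) (n t : Int) :
    cntAltLoop f (2 * n) 2 t = t + 2 * cntAltLoop f n 1 0 := by
  simpa using L_double f n 1 t one_pos

theorem L_odd2 (f : Nat) (n t : Int) (hodd : n % 2 = 1) (hn : 0 ≤ n) :
    cntAltLoop f n 2 t = cntAltLoop f (n - 1) 2 t := by
  simpa using L_oddstep f n 1 t hodd hn one_pos

theorem alt_even (m : Int) (hm : 1 ≤ m) : cnt_alt (2 * m) = m + 2 * cnt_alt m := by
  conv_lhs => unfold cnt_alt
  have h1 : (1 : Int) ≤ 2 * m := by omega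
  simp only [cntAltLoop, if_pos h1, mul_one]
  rw [PySem.Int.floordiv_eq_ediv_of_pos (by omega : (0:Int) < 1),
      PySem.Int.floordiv_eq_ediv_of_pos (by omega : (0:Int) < 2)]
  rw [Int.ediv_one, Int.mul_ediv_cancel_left m (by omega : (2:Int) ≠ 0)]
  rw [L_double2]
  rw [alt_canon ((2 * m).toNat) m (by omega) (by
    have h0 := int_lt_two_pow m (by omega)
    have hle : (2:Int) ^ (m.toNat + 1) ≤ 2 ^ ((2 * m).toNat) :=
      pow_le_pow_right₀ (by norm_num) (by omega)
    omega)]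
  ring

theorem alt_odd (n : Int) (h3 : 3 ≤ n) (hodd : n % 2 = 1) :
    cnt_alt n = cnt_alt (n - 1) + 1 := by
  conv_lhs => unfold cnt_alt
  conv_rhs => rw [cnt_alt]
  have h1 : (1 : Int) ≤ n := by omega
  have h1' : (1 : Int) ≤ n - 1 := by omega
  simp only [cntAltLoop, if_pos h1, if_pos h1', mul_one]
  rw [PySem.Int.floordiv_eq_ediv_of_pos (by omega : (0:Int) < 1),
      PySem.Int.floordiv_eq_ediv_of_pos (by omega : (0:Int) < 2),
      PySem.Int.floordiv_eq_ediv_of_pos (by omega : (0:Int) < 1),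
      PySem.Int.floordiv_eq_ediv_of_pos (by omega : (0:Int) < 2)]
  rw [Int.ediv_one, Int.ediv_one]
  rw [L_odd2 n.toNat n _ hodd (by omega)]
  have hA := int_lt_two_pow (n - 1) (by omega)
  have hfuel : ∀ t : Int, cntAltLoop n.toNat (n - 1) 2 t = cntAltLoop (n - 1).toNat (n - 1) 2 t := by
    intro t
    apply L_ext _ _ _ _ _ (by omega)
    · have hle : (2:Int) ^ ((n - 1).toNat + 1) ≤ 2 ^ (n.toNat + 1) :=
        pow_le_pow_right₀ (by norm_num) (by omega)
      have hs : (2:Int) ^ (n.toNat + 1) = 2 * 2 ^ n.toNat := by rw [pow_succ]; ring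
      omega
    · have hs : (2:Int) ^ ((n - 1).toNat + 1) = 2 * 2 ^ (n - 1).toNat := by rw [pow_succ]; ring
      omega
  rw [hfuel]
  rw [L_acc ((n - 1).toNat) (n - 1) 2 (0 + (n - n / 2)),
      L_acc ((n - 1).toNat) (n - 1) 2 (0 + (n - 1 - (n - 1) / 2))]
  omega

theorem alt_zero : cnt_alt 0 = 0 := by decide
theorem alt_one : cnt_alt 1 = 1 := by decide

theorem cntAux_eq (f : Nat) : ∀ (n : Int), 0 ≤ n → n.toNat < f → cntAux f n = cnt_alt n := by
  induction f with
  | zero => intro n _ h; omega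
  | succ f ih =>
    intro n hn hf
    by_cases h0 : n = 0
    · simp [cntAux, h0, alt_zero]
    by_cases h1 : n = 1
    · simp [cntAux, h1, alt_one]
    have h2 : 2 ≤ n := by omega
    have hmod : PySem.Int.mod n 2 = n % 2 := PySem.Int.mod_eq_emod_of_pos (by omega)
    by_cases he : n % 2 = 0
    · obtain ⟨m, rfl⟩ : ∃ m, n = 2 * m := ⟨n / 2, by omega⟩
      simp only [cntAux, if_neg h0, if_neg h1, hmod, if_pos he]
      rw [PySem.Int.floordiv_eq_ediv_of_pos (by omega : (0:Int) < 2),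
          Int.mul_ediv_cancel_left m (by omega : (2:Int) ≠ 0)]
      rw [ih m (by omega) (by omega)]
      rw [alt_even m (by omega)]
      ring
    · have ho : n % 2 = 1 := by omega
      simp only [cntAux, if_neg h0, if_neg h1, hmod, if_neg he]
      rw [ih (n - 1) (by omega) (by omega)]
      rw [alt_odd n (by omega) ho]

-- ===== VERDICT (by name: the statement is the Claim_ definition above) =====
theorem cnt_spec : Claim_equal_cnt := by
  intro num _ hpre
  unfold Spec_cnt cnt
  exact cntAux_eq (num.toNat + 1) num hpre (by omega)
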